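-- pv_equiv track=rewrite | github.com/sauravbhattacharya001/VoronoiMap | temp-builder/src/replication/steganography.py | encode_homoglyphs
-- ===== SOURCE A (Python) =====
-- from typing import Any, Dict, List, Optional, Sequence, Set, Tuple
--
-- HOMOGLYPH_MAP: Dict[str, List[str]] = {
--     'a': ['\u0430'],        # Cyrillic а
--     'c': ['\u0441'],        # Cyrillic с
--     'e': ['\u0435'],        # Cyrillic е
--     'o': ['\u043e'],        # Cyrillic о
--     'p': ['\u0440'],        # Cyrillic р
--     's': ['\u0455'],        # Cyrillic ѕ
--     'x': ['\u0445'],        # Cyrillic х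
--     'y': ['\u0443'],        # Cyrillic у
--     'i': ['\u0456'],        # Cyrillic і
--     'j': ['\u0458'],        # Cyrillic ј
--     'h': ['\u04bb'],        # Cyrillic һ
--     'A': ['\u0410'],        # Cyrillic А
--     'B': ['\u0412'],        # Cyrillic В
--     'C': ['\u0421'],        # Cyrillic С
--     'E': ['\u0415'],        # Cyrillic Е
--     'H': ['\u041d'],        # Cyrillic Н
--     'K': ['\u041a'],        # Cyrillic К
--     'M': ['\u041c'],        # Cyrillic М
--     'O': ['\u041e'],        # Cyrillic О
--     'P': ['\u0420'],        # Cyrillic Р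
--     'T': ['\u0422'],        # Cyrillic Т
--     'X': ['\u0425'],        # Cyrillic Х
-- }
--
-- def encode_homoglyphs(message: str, cover_text: str) -> str:
--     """Encode bits via homoglyph substitution (for testing purposes).
--
--     For each bit in *message*, finds the next substitutable character in
--     *cover_text* and swaps it with a Cyrillic homoglyph (bit=1) or
--     leaves it (bit=0).
--     """
--     bits = []
--     for ch in message:
--         bits.extend(f'{ord(ch):08b}')
--
--     result = list(cover_text)
--     bit_idx = 0
--     for i, ch in enumerate(result):
--         if bit_idx >= len(bits):
--             break
--         lower = ch.lower()
--         key = ch if ch in HOMOGLYPH_MAP else (lower if lower in HOMOGLYPH_MAP else None)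
--         if key is not None:
--             if bits[bit_idx] == '1':
--                 # Find the right-case homoglyph
--                 if ch.isupper() and ch in HOMOGLYPH_MAP:
--                     result[i] = HOMOGLYPH_MAP[ch][0]
--                 elif ch.islower() and ch in HOMOGLYPH_MAP:
--                     result[i] = HOMOGLYPH_MAP[ch][0]
--                 elif lower in HOMOGLYPH_MAP:
--                     result[i] = HOMOGLYPH_MAP[lower][0]
--             bit_idx += 1
--
--     return ''.join(result)
-- ===== SOURCE B (Python) =====
-- HOMOGLYPH_MAP = {
--     'a': ['\u0430'], 'c': ['\u0441'], 'e': ['\u0435'], 'o': ['\u043e'],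
--     'p': ['\u0440'], 's': ['\u0455'], 'x': ['\u0445'], 'y': ['\u0443'],
--     'i': ['\u0456'], 'j': ['\u0458'], 'h': ['\u04bb'],
--     'A': ['\u0410'], 'B': ['\u0412'], 'C': ['\u0421'], 'E': ['\u0415'],
--     'H': ['\u041d'], 'K': ['\u041a'], 'M': ['\u041c'], 'O': ['\u041e'],
--     'P': ['\u0420'], 'T': ['\u0422'], 'X': ['\u0425'],
-- }
--
--
-- def _embed_bits(bits, text):
--     """Embed one byte's bit list into the front of *text*; return the encoded
--     chunk together with the untouched remainder of the text."""
--     out = []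
--     pos = 0
--     for j, ch in enumerate(text):
--         if pos == len(bits):
--             return ''.join(out), text[j:]
--         key = ch if ch in HOMOGLYPH_MAP else ch.lower()
--         if key in HOMOGLYPH_MAP:
--             out.append(HOMOGLYPH_MAP[key][0] if bits[pos] else ch)
--             pos += 1
--         else:
--             out.append(ch)
--     return ''.join(out), ''
--
--
-- def encode_homoglyphs(message: str, cover_text: str) -> str:
--     """Byte-at-a-time staged encoding: for each message character, extract its
--     8 bits arithmetically and embed them into the next chunk of cover text,
--     threading the unconsumed remainder to the next byte."""
--     chunks = []
--     rest = cover_text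
--     for mch in message:
--         byte = ord(mch)
--         bits = [(byte >> k) & 1 for k in range(7, -1, -1)]
--         done, rest = _embed_bits(bits, rest)
--         chunks.append(done)
--     return ''.join(chunks) + rest
-- ===== Notes on version B (the rewrite author's own statement) =====
-- stated objective: alternative
-- what changed: A builds one global bit list with string formatting and makes a single indexed scan over the cover text with a bit cursor and a four-way case chain; B works byte-at-a-time: it extracts each message character's 8 bits arithmetically (shift-and-mask), embeds them into the next chunk of cover text via a helper returning (encoded chunk, remainder), and threads the remainder through the message loop.
import Mathlib
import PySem

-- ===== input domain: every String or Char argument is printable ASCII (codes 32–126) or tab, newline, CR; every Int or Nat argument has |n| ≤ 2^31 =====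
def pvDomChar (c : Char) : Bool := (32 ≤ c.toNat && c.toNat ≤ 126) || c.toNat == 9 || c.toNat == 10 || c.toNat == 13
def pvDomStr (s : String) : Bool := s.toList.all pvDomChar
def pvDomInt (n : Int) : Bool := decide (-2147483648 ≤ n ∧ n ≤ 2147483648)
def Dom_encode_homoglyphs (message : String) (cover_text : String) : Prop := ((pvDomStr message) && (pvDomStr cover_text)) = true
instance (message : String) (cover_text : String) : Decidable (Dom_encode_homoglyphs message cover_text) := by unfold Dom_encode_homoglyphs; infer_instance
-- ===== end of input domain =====

-- B replaces A's global bit list + single cursor scan by a byte-at-a-time scheme: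
-- each message byte's bits are extracted arithmetically and embedded into the next
-- chunk of cover text, threading the remainder (alternative decomposition, same cost).

-- ===== PORT A =====
-- module constant HOMOGLYPH_MAP (keys and glyphs are single characters, held as Char)
def HOMOGLYPH_MAP : PySem.Dict Char (List Char) := PySem.Dict.ofList
  [('a', ['\u0430']), ('c', ['\u0441']), ('e', ['\u0435']), ('o', ['\u043e']),
   ('p', ['\u0440']), ('s', ['\u0455']), ('x', ['\u0445']), ('y', ['\u0443']),
   ('i', ['\u0456']), ('j', ['\u0458']), ('h', ['\u04bb']),
   ('A', ['\u0410']), ('B', ['\u0412']), ('C', ['\u0421']), ('E', ['\u0415']),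
   ('H', ['\u041d']), ('K', ['\u041a']), ('M', ['\u041c']), ('O', ['\u041e']),
   ('P', ['\u0420']), ('T', ['\u0422']), ('X', ['\u0425'])]

-- 'ch in HOMOGLYPH_MAP'
def hmem (c : Char) : Bool := HOMOGLYPH_MAP.contains c
-- 'HOMOGLYPH_MAP[c][0]' (only evaluated under a membership guard; fallback unreachable)
def hget0 (c : Char) : Char :=
  match PySem.Dict.get? HOMOGLYPH_MAP c with
  | some (g :: _) => g
  | _ => c

-- f'{n:08b}' for 0 ≤ n: binary digits left-padded with '0' to width 8
def fmt08b (n : Nat) : List Char :=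
  let s := PySem.Int.toBinChars (n : Int)
  List.replicate (8 - s.length) '0' ++ s

-- the body of A's 'if bits[bit_idx] == '1'' branch (its three-way case chain, in order)
def substA (ch lower : Char) : Char :=
  if PySem.Chars.isupper ch && hmem ch then hget0 ch
  else if PySem.Chars.islower ch && hmem ch then hget0 ch
  else if hmem lower then hget0 lower
  else ch

-- A's loop over result with bit_idx: break when bits are exhausted; in-place update at i
def loopA : List Char → List Char → List Char
  | rest, [] => rest
  | [], _ :: _ => []
  | ch :: rest, b :: bs =>
    let lower := PySem.Chars.lowerChar ch
    if hmem ch || hmem lower then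
      (if b == '1' then substA ch lower else ch) :: loopA rest bs
    else
      ch :: loopA rest (b :: bs)

def encode_homoglyphs (message : String) (cover_text : String) : String :=
  let bits := message.toList.foldl (fun acc ch => acc ++ fmt08b ch.toNat) []
  String.mk (loopA cover_text.toList bits)

-- ===== PORT B =====
-- B: 'ch if ch in HOMOGLYPH_MAP else ch.lower()'
def keyB (ch : Char) : Char := if hmem ch then ch else PySem.Chars.lowerChar ch

-- B: '[(byte >> k) & 1 for k in range(7, -1, -1)]'; byte and k are ≥ 0, so Nat shift/mask are exact
def bitsOfByte (n : Nat) : List Int :=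
  (PySem.List.pyRange 7 (-1) (-1)).map (fun k => (((n >>> k.toNat) &&& 1 : Nat) : Int))

-- B's _embed_bits: consume text until the bit list is exhausted (pos == len(bits));
-- returns (encoded chunk, untouched remainder)
def embedBits : List Int → List Char → List Char × List Char
  | [], text => ([], text)
  | _ :: _, [] => ([], [])
  | b :: bs, ch :: rest =>
    if hmem (keyB ch) then
      let p := embedBits bs rest
      ((if b ≠ 0 then hget0 (keyB ch) else ch) :: p.1, p.2)
    else
      let p := embedBits (b :: bs) rest
      (ch :: p.1, p.2)

-- B's outer loop over message characters, threading the remaining cover text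
def encB : List Char → List Char → List Char
  | [], text => text
  | m :: ms, text =>
    let p := embedBits (bitsOfByte m.toNat) text
    p.1 ++ encB ms p.2

def encode_homoglyphs_alt (message : String) (cover_text : String) : String :=
  String.mk (encB message.toList cover_text.toList)

-- ===== PRECONDITION & SPEC =====
def Spec_encode_homoglyphs (message : String) (cover_text : String) (out : String) : Prop := out = encode_homoglyphs_alt message cover_text
instance (message : String) (cover_text : String) (out : String) : Decidable (Spec_encode_homoglyphs message cover_text out) := by unfold Spec_encode_homoglyphs; infer_instance

-- ===== CLAIM (what is proved, stated in full; the proofs are below) =====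
def Claim_equal_encode_homoglyphs : Prop := ∀ (message : String) (cover_text : String), Dom_encode_homoglyphs message cover_text → Spec_encode_homoglyphs message cover_text (encode_homoglyphs message cover_text)

-- ===== LEMMAS AND PROOFS =====

-- the character a bit value denotes in A's bit stream
def bitChar (i : Int) : Char := if i ≠ 0 then '1' else '0'

-- A's formatted byte equals B's arithmetic bits, rendered as characters (all bytes < 256)
set_option maxRecDepth 8000 in
lemma fmt_bits : ∀ n : Fin 256, fmt08b n.val = (bitsOfByte n.val).map bitChar := by decide

-- every key of the homoglyph map is a cased ASCII letter
lemma keyCased (c : Char) (h : hmem c = true) :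
    (PySem.Chars.isupper c || PySem.Chars.islower c) = true := by
  rw [hmem, PySem.Dict.contains_eq_decide_mem_keys] at h
  simp only [decide_eq_true_eq, HOMOGLYPH_MAP] at h
  fin_cases h <;> decide

-- A's substitutability test equals B's
lemma hmem_keyB (c : Char) :
    hmem (keyB c) = (hmem c || hmem (PySem.Chars.lowerChar c)) := by
  unfold keyB
  by_cases hc : hmem c = true <;> simp [hc]

-- on substitutable characters A's case chain and B's key expression agree
lemma subst_eq (c : Char) (h : (hmem c || hmem (PySem.Chars.lowerChar c)) = true) :
    substA c (PySem.Chars.lowerChar c) = hget0 (keyB c) := by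
  unfold substA keyB
  by_cases hc : hmem c = true
  · rcases Bool.or_eq_true_iff.mp (keyCased c hc) with hu | hl
    · simp [hc, hu]
    · simp [hc, hl]
  · simp only [hc, Bool.false_or] at h
    simp [hc, h]

-- A's scan on one byte's worth of bits equals B's embedBits chunk + remainder
lemma chunk (text : List Char) : ∀ (ibits bits2 : List Int),
    loopA text (ibits.map bitChar ++ bits2.map bitChar) =
    (embedBits ibits text).1 ++ loopA (embedBits ibits text).2 (bits2.map bitChar) := by
  induction text with
  | nil =>
    intro ibits bits2
    cases ibits with
    | nil => simp [embedBits]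
    | cons i is => cases bits2 <;> simp [loopA, embedBits]
  | cons ch rest ih =>
    intro ibits bits2
    cases ibits with
    | nil => simp [embedBits]
    | cons i is =>
      have hcond := hmem_keyB ch
      by_cases hs : (hmem ch || hmem (PySem.Chars.lowerChar ch)) = true
      · show loopA (ch :: rest) (bitChar i :: (is.map bitChar ++ bits2.map bitChar)) = _
        rw [loopA]
        simp only [hs, if_true]
        rw [embedBits]
        simp only [hcond, hs, if_true]
        have hhead : (if bitChar i == '1' then substA ch (PySem.Chars.lowerChar ch) else ch)
            = (if i ≠ 0 then hget0 (keyB ch) else ch) := by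
          by_cases hi : i = 0
          · simp [bitChar, hi]
          · simp [bitChar, hi, subst_eq ch hs]
        rw [hhead, ih is bits2, List.cons_append]
      · show loopA (ch :: rest) (bitChar i :: (is.map bitChar ++ bits2.map bitChar)) = _
        rw [loopA]
        simp only [hs, Bool.false_eq_true, if_false]
        rw [embedBits]
        simp only [hcond, hs, Bool.false_eq_true, if_false]
        have := ih (i :: is) bits2
        simp only [List.map_cons, List.cons_append] at this
        rw [this, List.cons_append]

-- a byte-wise bit stream over in-domain characters, rendered as characters
lemma flat_eq : ∀ (tl : List Char), (∀ c ∈ tl, c.toNat < 256) →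
    tl.flatMap (fun c => fmt08b c.toNat)
      = (tl.flatMap (fun c => bitsOfByte c.toNat)).map bitChar := by
  intro tl
  induction tl with
  | nil => intro _; simp
  | cons c cs ihc =>
    intro h
    simp only [List.flatMap_cons, List.map_append]
    rw [fmt_bits ⟨c.toNat, h c (by simp)⟩, ihc (fun d hd => h d (by simp [hd]))]

-- main induction: A's scan over the whole bit stream equals B's byte-chunked recursion
lemma main_eq : ∀ (ms : List Char) (text : List Char),
    (∀ c ∈ ms, pvDomChar c = true) →
    loopA text (ms.flatMap (fun c => fmt08b c.toNat)) = encB ms text := by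
  intro ms
  induction ms with
  | nil => intro text _; simp [loopA, encB]
  | cons m tl ih =>
    intro text hdom
    have hm : m.toNat < 256 := by
      have := hdom m (by simp)
      simp only [pvDomChar, Bool.or_eq_true, Bool.and_eq_true, decide_eq_true_eq,
        beq_iff_eq] at this
      omega
    have hfmt : fmt08b m.toNat = (bitsOfByte m.toNat).map bitChar :=
      fmt_bits ⟨m.toNat, hm⟩
    have htl : tl.flatMap (fun c => fmt08b c.toNat)
        = (tl.flatMap (fun c => bitsOfByte c.toNat)).map bitChar := by
      apply flat_eq
      intro d hd
      have := hdom d (by simp [hd])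
      simp only [pvDomChar, Bool.or_eq_true, Bool.and_eq_true, decide_eq_true_eq,
        beq_iff_eq] at this
      omega
    rw [List.flatMap_cons, hfmt, htl, chunk text (bitsOfByte m.toNat) _, encB]
    rw [← htl, ih (embedBits (bitsOfByte m.toNat) text).2
      (fun c hc => hdom c (by simp [hc]))]

-- ===== VERDICT (by name: the statement is the Claim_ definition above) =====
theorem encode_homoglyphs_spec : Claim_equal_encode_homoglyphs := by
  intro message cover_text hdom
  unfold Spec_encode_homoglyphs encode_homoglyphs encode_homoglyphs_alt
  rw [PySem.List.foldl_append_eq_flatMap]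
  simp only [List.nil_append]
  have hd : ∀ c ∈ message.toList, pvDomChar c = true := by
    unfold Dom_encode_homoglyphs pvDomStr at hdom
    simp only [Bool.and_eq_true, List.all_eq_true] at hdom
    exact hdom.1
  rw [main_eq message.toList cover_text.toList hd]
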